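-- pv_equiv track=rewrite | github.com/StasDeep/Advent-of-Code | 2015/03/solution.py | get_visited
-- ===== SOURCE A (Python) =====
-- def get_visited(directions):
--     directions_map = {'v': (-1, 0), '^': (1, 0), '>': (0, 1), '<': (0, -1),}
--     cur = (0, 0)
--     visited = {cur}
--     for d in directions:
--         y, x = directions_map[d]
--         cur = (cur[0] + y, cur[1] + x)
--         visited.add(cur)
--     return visited
-- ===== SOURCE B (Python) =====
-- def get_visited(directions):
--     directions_map = {'v': (-1, 0), '^': (1, 0), '>': (0, 1), '<': (0, -1)}
--     deltas = [directions_map[d] for d in directions]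
--
--     def path(cur, ds):
--         if not ds:
--             return [cur]
--         (dy, dx), rest = ds[0], ds[1:]
--         return [cur] + path((cur[0] + dy, cur[1] + dx), rest)
--
--     return set(path((0, 0), deltas))
-- ===== Notes on version B (the rewrite author's own statement) =====
-- stated objective: alternative
-- what changed: B maps the direction characters to a delta list, builds the whole trajectory by structural recursion, and collects the visited set once at the end, instead of A's single stateful loop that mutates a set as it walks.
import Mathlib
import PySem

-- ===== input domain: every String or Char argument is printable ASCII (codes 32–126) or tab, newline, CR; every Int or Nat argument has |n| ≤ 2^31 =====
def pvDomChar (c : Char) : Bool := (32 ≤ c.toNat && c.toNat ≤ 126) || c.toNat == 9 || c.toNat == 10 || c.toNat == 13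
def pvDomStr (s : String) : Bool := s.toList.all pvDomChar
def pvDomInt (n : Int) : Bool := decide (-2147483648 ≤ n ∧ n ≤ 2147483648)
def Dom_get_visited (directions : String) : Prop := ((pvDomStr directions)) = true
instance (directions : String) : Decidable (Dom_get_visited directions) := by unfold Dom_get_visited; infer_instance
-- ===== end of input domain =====

-- B builds the full trajectory by recursion and collects the set once; A mutates a set as it walks (alternative decomposition, same cost).

-- ===== PORT A =====
-- directions_map = {'v': (-1, 0), '^': (1, 0), '>': (0, 1), '<': (0, -1)}
def dirsMapA : PySem.Dict Char (Int × Int) :=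
  PySem.Dict.ofList [('v', (-1, 0)), ('^', (1, 0)), ('>', (0, 1)), ('<', (0, -1))]

-- one iteration of A's 'for d in directions' loop; 'none' = KeyError has occurred
def stepA (st : Option ((Int × Int) × PySem.Set (Int × Int))) (d : Char) :
    Option ((Int × Int) × PySem.Set (Int × Int)) :=
  st.bind fun (cur, visited) =>
    (PySem.Dict.get? dirsMapA d).map fun (y, x) =>
      let cur' := (cur.1 + y, cur.2 + x)
      (cur', PySem.Set.add visited cur')

def get_visited (directions : String) : List (Int × Int) :=
  match directions.toList.foldl stepA
      (some (((0 : Int), (0 : Int)), PySem.Set.add PySem.Set.empty ((0 : Int), (0 : Int)))) with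
  | some (_, visited) => visited
  | none => []   -- KeyError: excluded by Pre_get_visited

-- ===== PORT B =====
def dirsMapB : PySem.Dict Char (Int × Int) :=
  PySem.Dict.ofList [('v', (-1, 0)), ('^', (1, 0)), ('>', (0, 1)), ('<', (0, -1))]

-- def path(cur, ds): recursion over the delta list
def pathB : (Int × Int) → List (Int × Int) → List (Int × Int)
  | cur, [] => [cur]
  | cur, (dy, dx) :: rest => [cur] ++ pathB (cur.1 + dy, cur.2 + dx) rest

def get_visited_alt (directions : String) : List (Int × Int) :=
  match directions.toList.mapM (fun d => PySem.Dict.get? dirsMapB d) with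
  | some deltas => PySem.Set.ofList (pathB ((0 : Int), (0 : Int)) deltas)
  | none => []   -- KeyError in the comprehension: excluded by Pre_get_visited

-- ===== PRECONDITION & SPEC =====
-- Pre_ excludes exactly the strings containing a character other than 'v','^','>','<',
-- on which A raises KeyError (B raises there too).
def Pre_get_visited (directions : String) : Prop :=
  (directions.toList.all fun c => c == 'v' || c == '^' || c == '>' || c == '<') = true
instance (directions : String) : Decidable (Pre_get_visited directions) := by
  unfold Pre_get_visited; infer_instance
def pvWitness_get_visited : String := "^>v<vv"

def Spec_get_visited (directions : String) (out : List (Int × Int)) : Prop := out = get_visited_alt directions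
instance (directions : String) (out : List (Int × Int)) : Decidable (Spec_get_visited directions out) := by unfold Spec_get_visited; infer_instance

-- ===== CLAIM (what is proved, stated in full; the proofs are below) =====
def Claim_equal_get_visited : Prop := ∀ (directions : String), Dom_get_visited directions → Pre_get_visited directions → Spec_get_visited directions (get_visited directions)

-- ===== LEMMAS AND PROOFS =====

-- the position update both programs use
def fstep (p d : Int × Int) : Int × Int := (p.1 + d.1, p.2 + d.2)

lemma pathB_head (cur : Int × Int) (ds : List (Int × Int)) :
    pathB cur ds = cur :: (pathB cur ds).tail := by
  cases ds with
  | nil => rfl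
  | cons d rest => cases d; rfl

lemma key (l : List Char) :
    ∀ (cur : Int × Int) (vis : PySem.Set (Int × Int)),
    (∀ c ∈ l, ((c = 'v' ∨ c = '^') ∨ c = '>') ∨ c = '<') →
    ∃ ds : List (Int × Int),
      l.mapM (fun d => PySem.Dict.get? dirsMapB d) = some ds ∧
      l.foldl stepA (some (cur, vis)) =
        some (ds.foldl fstep cur, PySem.Set.update vis (pathB cur ds).tail) := by
  induction l with
  | nil =>
    intro cur vis _
    exact ⟨[], rfl, by simp [pathB, PySem.Set.update]⟩
  | cons c l ih =>
    intro cur vis h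
    have hc := h c (List.mem_cons_self ..)
    rw [or_assoc, or_assoc] at hc
    have hd : ∃ d : Int × Int, PySem.Dict.get? dirsMapA c = some d ∧
        PySem.Dict.get? dirsMapB c = some d := by
      rcases hc with rfl | rfl | rfl | rfl
      · exact ⟨(-1, 0), by decide, by decide⟩
      · exact ⟨(1, 0), by decide, by decide⟩
      · exact ⟨(0, 1), by decide, by decide⟩
      · exact ⟨(0, -1), by decide, by decide⟩
    obtain ⟨d, hA, hB⟩ := hd
    obtain ⟨ds, hmap, hfold⟩ := ih (fstep cur d) (PySem.Set.add vis (fstep cur d))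
      (fun c' hc' => h c' (List.mem_cons_of_mem _ hc'))
    refine ⟨d :: ds, ?_, ?_⟩
    · simp [List.mapM_cons, hB, hmap]
    · have hstep : stepA (some (cur, vis)) c =
          some (fstep cur d, PySem.Set.add vis (fstep cur d)) := by
        obtain ⟨dy, dx⟩ := d
        simp [stepA, hA, fstep]
      rw [List.foldl_cons, hstep, hfold]
      obtain ⟨dy, dx⟩ := d
      refine congrArg some (Prod.ext rfl ?_)
      show PySem.Set.update (PySem.Set.add vis (fstep cur (dy, dx)))
          (pathB (fstep cur (dy, dx)) ds).tail
        = PySem.Set.update vis (pathB cur ((dy, dx) :: ds)).tail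
      rw [show (pathB cur ((dy, dx) :: ds)).tail = pathB (fstep cur (dy, dx)) ds from rfl]
      rw [pathB_head (fstep cur (dy, dx)) ds]
      simp [PySem.Set.update]

-- ===== VERDICT (by name: the statement is the Claim_ definition above) =====
theorem get_visited_spec : Claim_equal_get_visited := by
  intro directions _ hpre
  unfold Pre_get_visited at hpre
  simp only [List.all_eq_true, Bool.or_eq_true, beq_iff_eq] at hpre
  unfold Spec_get_visited get_visited get_visited_alt
  obtain ⟨ds, hmap, hfold⟩ :=
    key directions.toList ((0 : Int), (0 : Int))
      (PySem.Set.add PySem.Set.empty ((0 : Int), (0 : Int))) hpre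
  rw [hmap, hfold]
  simp only [PySem.Set.update, PySem.Set.ofList]
  conv_rhs => rw [pathB_head ((0 : Int), (0 : Int)) ds]
  rfl
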